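-- pv_equiv track=rewrite | github.com/adrianx26/zensynora | myclaw/agents/newtech_agent.py | _categorize_tech
-- ===== SOURCE A (Python) =====
-- def _categorize_tech(tech_name: str) -> str:
--     """Categorize technology based on name."""
--     lower = tech_name.lower()
--     if any(k in lower for k in ['llm', 'model', 'gpt', 'transformer']):
--         return "LLM/Foundation Model"
--     if any(k in lower for k in ['agent', 'autonomous']):
--         return "AI Agent"
--     if any(k in lower for k in ['rag', 'retrieval', 'vector']):
--         return "Knowledge Retrieval"
--     if any(k in lower for k in ['safety', 'align', 'govern']):
--         return "AI Safety"
--     return "General AI"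
-- ===== SOURCE B (Python) =====
-- _KEYWORD_PRIORITY = [
--     ("llm", 0), ("model", 0), ("gpt", 0), ("transformer", 0),
--     ("agent", 1), ("autonomous", 1),
--     ("rag", 2), ("retrieval", 2), ("vector", 2),
--     ("safety", 3), ("align", 3), ("govern", 3),
-- ]
-- _LABELS = ["LLM/Foundation Model", "AI Agent", "Knowledge Retrieval",
--            "AI Safety", "General AI"]
--
--
-- def _categorize_tech(tech_name: str) -> str:
--     """Categorize technology: min matching keyword priority, then label lookup."""
--     lower = tech_name.lower()
--     best = len(_LABELS) - 1  # default: "General AI"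
--     for kw, prio in _KEYWORD_PRIORITY:
--         if kw in lower:
--             best = min(best, prio)
--     return _LABELS[best]
-- ===== Notes on version B (the rewrite author's own statement) =====
-- stated objective: alternative
-- what changed: A's ordered if-chain with early return per category is replaced by a single min-accumulator pass over a flat (keyword, priority) list followed by a label-array lookup; no early return and no per-category any().
import Mathlib
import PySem

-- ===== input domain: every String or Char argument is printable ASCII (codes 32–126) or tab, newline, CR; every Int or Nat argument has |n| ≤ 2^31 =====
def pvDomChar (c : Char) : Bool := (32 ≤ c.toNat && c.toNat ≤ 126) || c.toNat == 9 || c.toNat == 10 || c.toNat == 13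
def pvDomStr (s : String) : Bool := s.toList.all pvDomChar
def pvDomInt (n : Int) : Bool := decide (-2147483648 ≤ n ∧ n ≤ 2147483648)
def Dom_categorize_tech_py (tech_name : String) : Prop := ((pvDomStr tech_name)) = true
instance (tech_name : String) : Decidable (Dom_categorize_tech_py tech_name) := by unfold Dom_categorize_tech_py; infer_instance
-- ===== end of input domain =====

-- B replaces A's early-return if-chain by a min-priority fold over a flat keyword list plus a label lookup (same cost; alternative decomposition).


-- ===== PORT A =====
-- (Python's 'lower = tech_name.lower()' is inlined at each use; same value.)
def categorize_tech_py (tech_name : String) : String :=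
  if (["llm", "model", "gpt", "transformer"]).any (fun k => PySem.Str.isIn k (PySem.Str.lower tech_name)) then
    "LLM/Foundation Model"
  else if (["agent", "autonomous"]).any (fun k => PySem.Str.isIn k (PySem.Str.lower tech_name)) then
    "AI Agent"
  else if (["rag", "retrieval", "vector"]).any (fun k => PySem.Str.isIn k (PySem.Str.lower tech_name)) then
    "Knowledge Retrieval"
  else if (["safety", "align", "govern"]).any (fun k => PySem.Str.isIn k (PySem.Str.lower tech_name)) then
    "AI Safety"
  else
    "General AI"

-- ===== PORT B =====
def catKEYWORD_PRIORITY : List (String × Nat) :=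
  [("llm", 0), ("model", 0), ("gpt", 0), ("transformer", 0),
   ("agent", 1), ("autonomous", 1),
   ("rag", 2), ("retrieval", 2), ("vector", 2),
   ("safety", 3), ("align", 3), ("govern", 3)]

def catLABELS : List String :=
  ["LLM/Foundation Model", "AI Agent", "Knowledge Retrieval", "AI Safety", "General AI"]

-- (Python's 'lower' is likewise inlined; the for-loop with the 'best' accumulator is the foldl.)
def categorize_tech_py_alt (tech_name : String) : String :=
  catLABELS.getD
    (catKEYWORD_PRIORITY.foldl
      (fun best kp =>
        if PySem.Str.isIn kp.1 (PySem.Str.lower tech_name) then min best kp.2 else best)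
      (catLABELS.length - 1))
    "General AI"

-- ===== PRECONDITION & SPEC =====
def Spec_categorize_tech_py (tech_name : String) (out : String) : Prop := out = categorize_tech_py_alt tech_name
instance (tech_name : String) (out : String) : Decidable (Spec_categorize_tech_py tech_name out) := by unfold Spec_categorize_tech_py; infer_instance

-- ===== CLAIM (what is proved, stated in full; the proofs are below) =====
def Claim_equal_categorize_tech_py : Prop := ∀ (tech_name : String), Dom_categorize_tech_py tech_name → Spec_categorize_tech_py tech_name (categorize_tech_py tech_name)

-- ===== LEMMAS AND PROOFS =====

-- Folding min over one constant-priority group hits the group's priority iff any keyword matches.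
theorem catFoldGroup (m : String → Bool) (p : Nat) (ks : List String) (acc : Nat) :
    (ks.map (fun k => (k, p))).foldl
      (fun best kp => if m kp.1 then min best kp.2 else best) acc
    = if ks.any m then min acc p else acc := by
  induction ks generalizing acc with
  | nil => simp
  | cons k tl ih =>
    simp only [List.map_cons, List.foldl_cons, List.any_cons]
    by_cases h : m k = true
    · simp only [h, Bool.true_or, if_true, ih]
      split <;> omega
    · simp only [Bool.not_eq_true] at h
      simp only [h, Bool.false_or, Bool.false_eq_true, if_false, ih]

-- ===== VERDICT (by name: the statement is the Claim_ definition above) =====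
theorem categorize_tech_py_spec : Claim_equal_categorize_tech_py := by
  intro tech_name _
  unfold Spec_categorize_tech_py categorize_tech_py categorize_tech_py_alt
  have hsplit : catKEYWORD_PRIORITY =
      (["llm", "model", "gpt", "transformer"].map (fun k => (k, (0 : Nat))))
      ++ (["agent", "autonomous"].map (fun k => (k, 1)))
      ++ (["rag", "retrieval", "vector"].map (fun k => (k, 2)))
      ++ (["safety", "align", "govern"].map (fun k => (k, 3))) := rfl
  rw [hsplit, List.foldl_append, List.foldl_append, List.foldl_append]
  simp only [catFoldGroup (fun k => PySem.Str.isIn k (PySem.Str.lower tech_name))]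
  split_ifs <;> rfl
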